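-- pv_equiv track=rewrite | github.com/PDCMFinder/pdcm-etl | etl/jobs/transformation/treatment_type_helper_transformer_job.py | calculate_type
-- ===== SOURCE A (Python) =====
-- KEYWORDS_BY_TYPE = [
--     {"type": "Hormone Therapy", "keywords": ["hormone therapy"]},
--     {
--         "type": "Immunotherapy",
--         "keywords": ["cytokine", "immunotherapeutic", "immunomodulatory"],
--     },
--     {
--         "type": "Targeted Therapy",
--         "keywords": [
--             "targeted therapy",
--             "targeting",
--             "anti-hgf monoclonal antibody tak-701",
--         ],
--     },
--     {"type": "Chemotherapy", "keywords": ["chemotherapy", "chemotherapeutic"]},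
--     {
--         "type": "Surgery",
--         "keywords": ["surgery", "mammoplasty", "ectomy", "biopsy", "plasty"],
--     },
--     {
--         "type": "Radiation Therapy",
--         "keywords": ["radiation therapy"],
--     },
-- ]
--
-- def calculate_type(treatment_name: str, ancestors: list) -> list:
--     """
--     Calculates the treatment types for a given treatment based on its list of ancestors extracted from an ontology.
--
--     The `ancestors` list corresponds to ontology terms for which `treatment_name` is a descendant. The `treatment_name`
--     is the label of an ontology term related to potential cancer treatments, and the function identifies its types
--     based on its hierarchical position within the ontology.
--
--     Treatment types are not mutually exclusive, so the function allows for multiple values by returning a list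
--     of categories that correspond to the treatment's ancestor terms.
--
--     :param str treatment_name: The harmonized name of the treatment, corresponding to an ontology term label.
--     :param list ancestors: A list of strings representing the ontology term names of all the ancestors of `treatment_name`.
--     :return: A list containing the types of the treatment based on its ontology ancestors.
--     :rtype: list
--     """
--     if not ancestors:
--         ancestors = []
--     types = []
--
--     # Put all in a single list to compare with keywords
--     ancestors.append(treatment_name)
--
--     lower_case_names = [x.lower() for x in ancestors]
--
--     for entry in KEYWORDS_BY_TYPE:
--         keywords = entry["keywords"]
--
--         # Check if any of the keywords matches exactly one of the ancestor terms
--         if lists_intersect(keywords, lower_case_names):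
--             types.append(entry["type"])
--
--         # Check if any of the ancestor terms contains the a keyword. This potentially is slower to process, so only
--         # done when no intersection between both lists was found
--         elif any_ancestors_contain_keyword(lower_case_names, keywords):
--             types.append(entry["type"])
--
--     return types
--
-- def lists_intersect(list_a: list, list_b: list) -> bool:
--     intersection = set(list_a).intersection(list_b)
--     return intersection
--
-- def any_ancestors_contain_keyword(ancestors: list, keywords: list) -> bool:
--     for ancestor in ancestors:
--         for keyword in keywords:
--             if keyword in ancestor:
--                 return True
--     return False
-- ===== SOURCE B (Python) =====
-- KEYWORDS_BY_TYPE = [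
--     {"type": "Hormone Therapy", "keywords": ["hormone therapy"]},
--     {
--         "type": "Immunotherapy",
--         "keywords": ["cytokine", "immunotherapeutic", "immunomodulatory"],
--     },
--     {
--         "type": "Targeted Therapy",
--         "keywords": [
--             "targeted therapy",
--             "targeting",
--             "anti-hgf monoclonal antibody tak-701",
--         ],
--     },
--     {"type": "Chemotherapy", "keywords": ["chemotherapy", "chemotherapeutic"]},
--     {
--         "type": "Surgery",
--         "keywords": ["surgery", "mammoplasty", "ectomy", "biopsy", "plasty"],
--     },
--     {
--         "type": "Radiation Therapy",
--         "keywords": ["radiation therapy"],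
--     },
-- ]
--
--
-- def calculate_type(treatment_name: str, ancestors: list) -> list:
--     """Join all lowercased names into one newline-separated haystack string and do a
--     single substring test per keyword against it.
--
--     Correct because no keyword contains a newline, so a keyword occurs in the
--     haystack iff it occurs inside one of the joined names; an exact match is a
--     special case of substring containment.
--     Unlike A, this does not append treatment_name to the caller's `ancestors` list.
--     """
--     names = [x.lower() for x in (ancestors or [])]
--     names.append(treatment_name.lower())
--     haystack = "\n".join(names)
--     return [
--         entry["type"]
--         for entry in KEYWORDS_BY_TYPE
--         if any(keyword in haystack for keyword in entry["keywords"])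
--     ]
-- ===== Notes on version B (the rewrite author's own statement) =====
-- stated objective: alternative
-- what changed: Replaces A's per-type scans over the name list (set intersection, then a nested name-by-keyword containment loop) with a joined-haystack algorithm: concatenate all lowercased names into one newline-separated string once, then do a single substring test per keyword against that string; this is correct because no keyword contains a newline, and an exact match is a special case of containment. B also does not mutate the caller's ancestors list.
import Mathlib
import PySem

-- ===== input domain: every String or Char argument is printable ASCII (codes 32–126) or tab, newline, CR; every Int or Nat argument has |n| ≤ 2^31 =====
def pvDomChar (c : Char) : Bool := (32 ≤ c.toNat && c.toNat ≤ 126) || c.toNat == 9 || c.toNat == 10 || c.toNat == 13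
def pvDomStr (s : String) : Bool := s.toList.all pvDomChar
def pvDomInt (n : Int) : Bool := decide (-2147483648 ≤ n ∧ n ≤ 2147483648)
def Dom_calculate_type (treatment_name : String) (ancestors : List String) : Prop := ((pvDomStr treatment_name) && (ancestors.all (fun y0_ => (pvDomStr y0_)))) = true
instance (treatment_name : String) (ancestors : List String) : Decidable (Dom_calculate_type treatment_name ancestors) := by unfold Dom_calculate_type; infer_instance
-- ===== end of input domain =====

-- ===== PORT A =====
-- B joins all lowercased names into one newline-separated haystack and does one substring
-- test per keyword against it (objective: alternative algorithm; no keyword contains '\n').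
-- Note: Python A appends treatment_name to the caller's `ancestors` list in place; the
-- equivalence proved here is about the RETURN value only (B does not mutate).
def KEYWORDS_BY_TYPE : List (String × List String) :=
  [("Hormone Therapy", ["hormone therapy"]),
   ("Immunotherapy", ["cytokine", "immunotherapeutic", "immunomodulatory"]),
   ("Targeted Therapy", ["targeted therapy", "targeting", "anti-hgf monoclonal antibody tak-701"]),
   ("Chemotherapy", ["chemotherapy", "chemotherapeutic"]),
   ("Surgery", ["surgery", "mammoplasty", "ectomy", "biopsy", "plasty"]),
   ("Radiation Therapy", ["radiation therapy"])]

-- set(list_a).intersection(list_b), used for its truthiness (nonempty = True)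
def lists_intersect (list_a list_b : List String) : Bool :=
  !((PySem.Set.inter (PySem.Set.ofList list_a) list_b).isEmpty)

-- nested for-loops with early return on first hit
def any_ancestors_contain_keyword (ancestors keywords : List String) : Bool :=
  ancestors.any (fun ancestor => keywords.any (fun keyword => PySem.Str.isIn keyword ancestor))

def calculate_type (treatment_name : String) (ancestors : List String) : List String :=
  -- `if not ancestors: ancestors = []` rebinds to an equal value; ancestors.append(treatment_name)
  let ancestors := ancestors ++ [treatment_name]
  let lower_case_names := ancestors.map PySem.Str.lower
  KEYWORDS_BY_TYPE.foldl (fun types entry =>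
    if lists_intersect entry.2 lower_case_names then types ++ [entry.1]
    else if any_ancestors_contain_keyword lower_case_names entry.2 then types ++ [entry.1]
    else types) []

-- ===== PORT B =====
def calculate_type_alt (treatment_name : String) (ancestors : List String) : List String :=
  -- names = [x.lower() for x in (ancestors or [])]; names.append(treatment_name.lower())
  let names := ancestors.map PySem.Str.lower ++ [PySem.Str.lower treatment_name]
  -- haystack = "\n".join(names)
  let haystack := PySem.Str.join "\n" names
  (KEYWORDS_BY_TYPE.filter (fun entry =>
    entry.2.any (fun keyword => PySem.Str.isIn keyword haystack))).map (fun entry => entry.1)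

-- ===== PRECONDITION & SPEC =====
def Spec_calculate_type (treatment_name : String) (ancestors : List String) (out : List String) : Prop := out = calculate_type_alt treatment_name ancestors
instance (treatment_name : String) (ancestors : List String) (out : List String) : Decidable (Spec_calculate_type treatment_name ancestors out) := by unfold Spec_calculate_type; infer_instance

-- ===== CLAIM (what is proved, stated in full; the proofs are below) =====
def Claim_equal_calculate_type : Prop := ∀ (treatment_name : String) (ancestors : List String), Dom_calculate_type treatment_name ancestors → Spec_calculate_type treatment_name ancestors (calculate_type treatment_name ancestors)

-- ===== LEMMAS AND PROOFS =====

-- a newline-free word occurring in a ++ '\n' :: b occurs entirely inside a or inside b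
theorem ct_infix_split {k a b : List Char} (hk : '\n' ∉ k)
    (h : k <:+: (a ++ '\n' :: b)) : k <:+: a ∨ k <:+: b := by
  obtain ⟨s, t, he⟩ := h
  rw [List.append_assoc] at he
  by_cases h1 : s.length + k.length ≤ a.length
  · left
    refine ⟨s, t.take (a.length - (s.length + k.length)), ?_⟩
    have h2 := congrArg (List.take a.length) he
    rw [List.take_append, List.take_append,
      List.take_of_length_le (by omega : s.length ≤ a.length),
      List.take_of_length_le (by omega : k.length ≤ a.length - s.length),
      show ('\n' :: b : List Char) = ['\n'] ++ b from rfl, ← List.append_assoc,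
      List.take_left' (by simp)] at h2
    rw [show a.length - (s.length + k.length) = a.length - s.length - k.length by omega]
    exact h2
  · by_cases h2 : a.length + 1 ≤ s.length
    · right
      refine ⟨s.drop (a.length + 1), t, ?_⟩
      have h3 := congrArg (List.drop (a.length + 1)) he
      rw [List.drop_append, Nat.sub_eq_zero_of_le h2, List.drop_zero] at h3
      rw [show List.drop (a.length + 1) (a ++ '\n' :: b) = b by
        rw [List.drop_append, List.drop_of_length_le (by omega : a.length ≤ a.length + 1),
          Nat.add_sub_cancel_left]
        simp] at h3
      rw [List.append_assoc]
      exact h3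
    · exfalso
      have hs : s.length ≤ a.length := by omega
      have hlt : a.length - s.length < k.length := by omega
      have e1 : (s ++ (k ++ t))[a.length]? = some k[a.length - s.length] := by
        rw [List.getElem?_append_right hs, List.getElem?_append_left hlt,
          List.getElem?_eq_getElem hlt]
      have e2 : (a ++ '\n' :: b)[a.length]? = some '\n' := by
        rw [List.getElem?_append_right (le_refl _)]; simp
      rw [he, e2] at e1
      exact hk ((Option.some.inj e1).symm ▸ List.getElem_mem hlt)

-- a newline-free word occurs in the '\n'-join iff it occurs in one of the parts
theorem ct_infix_join (k : List Char) (hk : '\n' ∉ k) :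
    ∀ parts : List (List Char), parts ≠ [] →
      (k <:+: PySem.Chars.join ['\n'] parts ↔ ∃ p ∈ parts, k <:+: p)
  | [], h => absurd rfl h
  | [p], _ => by rw [PySem.Chars.join_singleton]; simp
  | p :: q :: rest, _ => by
      rw [PySem.Chars.join_cons_cons, List.append_assoc, List.singleton_append]
      constructor
      · intro h
        rcases ct_infix_split hk h with h | h
        · exact ⟨p, by simp, h⟩
        · obtain ⟨x, hx, hkx⟩ := (ct_infix_join k hk (q :: rest) (by simp)).1 h
          exact ⟨x, by simp [hx], hkx⟩
      · rintro ⟨x, hx, hkx⟩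
        rcases List.mem_cons.1 hx with rfl | hx
        · exact hkx.trans (List.prefix_append _ _).isInfix
        · refine ((ct_infix_join k hk (q :: rest) (by simp)).2 ⟨x, hx, hkx⟩).trans ?_
          rw [show p ++ '\n' :: PySem.Chars.join ['\n'] (q :: rest)
              = (p ++ ['\n']) ++ PySem.Chars.join ['\n'] (q :: rest) by simp]
          exact (List.suffix_append _ _).isInfix

-- B's per-type test against the joined haystack = a scan of the individual names
theorem ct_any_join (ks : List String) (hks : ∀ kw ∈ ks, '\n' ∉ kw.toList)
    (names : List String) (h : names ≠ []) :
    (ks.any fun keyword => PySem.Str.isIn keyword (PySem.Str.join "\n" names))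
    = names.any (fun n => ks.any (fun keyword => PySem.Str.isIn keyword n)) := by
  rw [Bool.eq_iff_iff]
  simp only [List.any_eq_true]
  constructor
  · rintro ⟨kw, hkw, hin⟩
    rw [PySem.Str.isIn_iff_infix, PySem.Str.toList_join,
      show ("\n" : String).toList = ['\n'] from rfl] at hin
    obtain ⟨p, hp, hkp⟩ := (ct_infix_join kw.toList (hks kw hkw) (names.map String.toList)
      (by simpa using h)).1 hin
    obtain ⟨n, hn, rfl⟩ := List.mem_map.1 hp
    exact ⟨n, hn, kw, hkw, (PySem.Str.isIn_iff_infix _ _).2 hkp⟩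
  · rintro ⟨n, hn, kw, hkw, hin⟩
    refine ⟨kw, hkw, ?_⟩
    rw [PySem.Str.isIn_iff_infix, PySem.Str.toList_join,
      show ("\n" : String).toList = ['\n'] from rfl]
    exact (ct_infix_join kw.toList (hks kw hkw) (names.map String.toList)
      (by simpa using h)).2 ⟨n.toList, List.mem_map_of_mem hn,
        (PySem.Str.isIn_iff_infix _ _).1 hin⟩

-- A's per-entry condition collapses: an exact match k ∈ names is in particular a substring hit
theorem ct_condA_eq (keywords names : List String) :
    (lists_intersect keywords names || any_ancestors_contain_keyword names keywords)
    = names.any (fun n => keywords.any (fun keyword => PySem.Str.isIn keyword n)) := by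
  have hsub : lists_intersect keywords names = true →
      any_ancestors_contain_keyword names keywords = true := by
    intro h
    unfold lists_intersect at h
    rw [Bool.not_eq_true', List.isEmpty_eq_false_iff_exists_mem] at h
    obtain ⟨k, hk⟩ := h
    rw [PySem.Set.mem_inter, PySem.Set.mem_ofList] at hk
    unfold any_ancestors_contain_keyword
    rw [List.any_eq_true]
    refine ⟨k, hk.2, ?_⟩
    rw [List.any_eq_true]
    exact ⟨k, hk.1, by rw [PySem.Str.isIn_iff_infix]⟩
  have heq : any_ancestors_contain_keyword names keywords
      = names.any (fun n => keywords.any (fun keyword => PySem.Str.isIn keyword n)) := rfl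
  rw [← heq]
  cases h : lists_intersect keywords names
  · simp
  · simp [hsub h]

theorem ct_ifA (kws names : List String) (x : List String) (v : String) :
    (if lists_intersect kws names then x ++ [v]
     else if any_ancestors_contain_keyword names kws then x ++ [v] else x)
    = (if names.any (fun n => kws.any (fun keyword => PySem.Str.isIn keyword n)) then x ++ [v] else x) := by
  rw [← ct_condA_eq]
  cases h : lists_intersect kws names <;> simp

-- ===== VERDICT (by name: the statement is the Claim_ definition above) =====
theorem calculate_type_spec : Claim_equal_calculate_type := by
  intro treatment_name ancestors _
  unfold Spec_calculate_type calculate_type calculate_type_alt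
  simp only [List.map_append, List.map_cons, List.map_nil]
  have hne : ancestors.map PySem.Str.lower ++ [PySem.Str.lower treatment_name] ≠ [] := by simp
  simp only [KEYWORDS_BY_TYPE, List.foldl_cons, List.foldl_nil, ct_ifA,
    List.filter_cons, List.filter_nil,
    ct_any_join ["hormone therapy"] (by decide) _ hne,
    ct_any_join ["cytokine", "immunotherapeutic", "immunomodulatory"] (by decide) _ hne,
    ct_any_join ["targeted therapy", "targeting", "anti-hgf monoclonal antibody tak-701"] (by decide) _ hne,
    ct_any_join ["chemotherapy", "chemotherapeutic"] (by decide) _ hne,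
    ct_any_join ["surgery", "mammoplasty", "ectomy", "biopsy", "plasty"] (by decide) _ hne,
    ct_any_join ["radiation therapy"] (by decide) _ hne]
  split_ifs <;> rfl
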